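-- pv_equiv track=rewrite | github.com/MrBrantCode/unitest_baseline | mut_generate/mist_train_cf/cf_75371/solution.py | inverse_even_characters
-- ===== SOURCE A (Python) =====
-- def inverse_even_characters(s: str) -> str:
--     # Get characters at even indices and reverse
--     even_chars = s[::2][::-1]
--     # Get characters at odd indices
--     odd_chars = s[1::2]
--     # Initialize output string
--     output = ""
--     # Iterate over the lengths of even and odd parts
--     for i in range(max(len(even_chars), len(odd_chars))):
--         # Add next character from even_chars list if available
--         if i < len(even_chars):
--             output += even_chars[i]
--         # Add next character from odd_chars list if available
--         if i < len(odd_chars):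
--             output += odd_chars[i]
--     return output
-- ===== SOURCE B (Python) =====
-- def inverse_even_characters(s: str) -> str:
--     chars = list(s)
--     evens = chars[::2]
--     evens.reverse()
--     chars[::2] = evens
--     return "".join(chars)
-- ===== Notes on version B (the rewrite author's own statement) =====
-- stated objective: simpler
-- what changed: B replaces A's explicit max-length interleaving loop with per-character conditional string appends by reversing the even-index slice and writing it back via stride-2 slice assignment, leaving odd positions untouched.
import Mathlib
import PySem

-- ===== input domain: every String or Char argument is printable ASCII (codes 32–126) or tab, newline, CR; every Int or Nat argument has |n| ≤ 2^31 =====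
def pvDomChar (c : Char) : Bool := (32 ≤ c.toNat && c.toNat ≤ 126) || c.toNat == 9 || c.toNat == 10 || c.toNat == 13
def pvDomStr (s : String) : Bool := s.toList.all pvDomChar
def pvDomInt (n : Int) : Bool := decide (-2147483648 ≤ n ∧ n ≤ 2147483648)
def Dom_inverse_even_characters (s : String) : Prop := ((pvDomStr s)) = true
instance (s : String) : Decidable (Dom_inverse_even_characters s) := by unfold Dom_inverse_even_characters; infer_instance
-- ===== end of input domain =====

-- B replaces A's explicit max-length interleaving loop by reversing the even-index slice and
-- writing it back through a stride-2 slice assignment (objective: simpler).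

-- ===== PORT A =====
def inverse_even_characters (s : String) : String :=
  -- even_chars = s[::2][::-1]
  let even_chars :=
    (PySem.List.slice? ((PySem.List.slice? s.toList none none 2).getD []) none none (-1)).getD []
  -- odd_chars = s[1::2]
  let odd_chars := (PySem.List.slice? s.toList (some 1) none 2).getD []
  -- for i in range(max(len(even_chars), len(odd_chars))): conditional appends
  String.ofList <|
    (PySem.List.pyRange 0 (max (PySem.List.len even_chars) (PySem.List.len odd_chars)) 1).foldl
      (fun acc i =>
        let acc2 := if i < PySem.List.len even_chars then acc ++ [PySem.List.pyGetD even_chars i ' '] else acc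
        if i < PySem.List.len odd_chars then acc2 ++ [PySem.List.pyGetD odd_chars i ' '] else acc2)
      []

-- ===== PORT B =====
-- hand port of the stride-2 full-slice assignment `chars[::2] = vals`; exact when vals has exactly
-- the slice's length (Python raises ValueError otherwise; in B the lengths always match)
def assignStride2 {α : Type} (vals : List α) (cs : List α) : List α :=
  match cs, vals with
  | [], _ => []
  | c :: rest, [] => c :: rest
  | _ :: rest, v :: vs =>
    match rest with
    | [] => [v]
    | d :: ds => v :: d :: assignStride2 vs ds

def inverse_even_characters_alt (s : String) : String :=
  let chars := s.toList
  let evens := (PySem.List.slice? chars none none 2).getD []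
  let evens := evens.reverse
  String.ofList (assignStride2 evens chars)

-- ===== PRECONDITION & SPEC =====
def Spec_inverse_even_characters (s : String) (out : String) : Prop := out = inverse_even_characters_alt s
instance (s : String) (out : String) : Decidable (Spec_inverse_even_characters s out) := by unfold Spec_inverse_even_characters; infer_instance

-- ===== CLAIM (what is proved, stated in full; the proofs are below) =====
def Claim_equal_inverse_even_characters : Prop := ∀ (s : String), Dom_inverse_even_characters s → Spec_inverse_even_characters s (inverse_even_characters s)

-- ===== LEMMAS AND PROOFS =====

-- the even-index elements of a list
def ev2 {α : Type} : List α → List α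
  | [] => []
  | [a] => [a]
  | a :: _ :: t => a :: ev2 t

-- interleave two lists starting with the first
def inter {α : Type} : List α → List α → List α
  | [], ys => ys
  | x :: xs, ys => x :: inter ys xs
termination_by xs ys => xs.length + ys.length
decreasing_by simp; omega

lemma ev2_cons {α : Type} (x : α) (xs : List α) : ev2 (x :: xs) = x :: ev2 xs.tail := by
  cases xs <;> simp [ev2]

lemma len_ev2 {α : Type} (xs : List α) : (ev2 xs).length = (xs.length + 1) / 2 := by
  induction xs using ev2.induct with
  | case1 => simp [ev2]
  | case2 a => simp [ev2]
  | case3 a b t ih => simp [ev2, ih]; omega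

lemma fm2 {α : Type} (xs : List α) :
    List.filterMap (fun k : Nat => xs[2*k]?) (List.range ((xs.length + 1) / 2)) = ev2 xs := by
  induction xs using ev2.induct with
  | case1 => simp [ev2]
  | case2 a => simp [ev2, List.range_one]
  | case3 a b t ih =>
    have hc : ((a :: b :: t).length + 1) / 2 = (t.length + 1) / 2 + 1 := by simp; omega
    rw [hc, List.range_succ_eq_map, List.filterMap_cons]
    simp only [List.filterMap_map, mul_zero, List.getElem?_cons_zero, ev2]
    congr 1

lemma slice?_two {α : Type} (xs : List α) :
    PySem.List.slice? xs none none 2 = some (ev2 xs) := by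
  simp only [PySem.List.slice?, PySem.List.sliceIndices]
  norm_num
  have hcount : (if 0 < xs.length then (((xs.length : Int) + 2 - 1) / 2).toNat else 0)
      = (xs.length + 1) / 2 := by
    split_ifs with h <;> omega
  rw [hcount, ← fm2]
  congr 1

lemma slice?_odd {α : Type} (xs : List α) :
    PySem.List.slice? xs (some 1) none 2 = some (ev2 xs.tail) := by
  cases xs with
  | nil => simp [PySem.List.slice?, PySem.List.sliceIndices, ev2]
  | cons a t =>
    simp only [PySem.List.slice?, PySem.List.sliceIndices]
    norm_num
    have hcount : (if 0 < t.length then (((t.length : Int) + 2 - 1) / 2).toNat else 0)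
        = (t.length + 1) / 2 := by
      split_ifs with h <;> omega
    rw [hcount, ← fm2]
    apply List.filterMap_congr
    intro k _
    have h1 : ((1 : Int) + 2 * (k : Nat)).toNat = 2 * k + 1 := by omega
    rw [h1]
    simp

lemma flat_inter (es os : List Char)
    (h1 : os.length ≤ es.length) (h2 : es.length ≤ os.length + 1) :
    (List.range (max es.length os.length)).flatMap
      (fun k => (if k < es.length then [es.getD k ' '] else []) ++
                (if k < os.length then [os.getD k ' '] else [])) = inter es os := by
  induction es generalizing os with
  | nil =>
    have : os = [] := by cases os <;> simp_all
    subst this; simp [inter]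
  | cons e es' ih =>
    cases os with
    | nil =>
      have : es' = [] := by cases es' <;> simp_all
      subst this; simp [inter]
    | cons o os' =>
      have hm : max (e :: es').length (o :: os').length = max es'.length os'.length + 1 := by
        simp
      rw [hm, List.range_succ_eq_map]
      simp only [List.flatMap_cons, List.flatMap_map]
      have hfn : ∀ k ∈ List.range (max es'.length os'.length),
          (fun k => (if k < (e :: es').length then [(e :: es').getD k ' '] else []) ++
                (if k < (o :: os').length then [(o :: os').getD k ' '] else [])) k.succ
          = (fun k => (if k < es'.length then [es'.getD k ' '] else []) ++
              (if k < os'.length then [os'.getD k ' '] else [])) k := by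
        intro k _
        simp
      rw [List.flatMap_congr hfn]
      rw [ih os' (by simp at h1 h2 ⊢; omega) (by simp at h1 h2 ⊢; omega)]
      simp [inter]

lemma assign_inter (cs : List Char) : ∀ es : List Char, es.length = (ev2 cs).length →
    assignStride2 es cs = inter es (ev2 cs.tail) := by
  induction cs using ev2.induct with
  | case1 =>
    intro es h
    simp [show ev2 ([] : List Char) = [] from rfl] at h
    subst h
    simp [assignStride2, inter, show ev2 ([] : List Char) = [] from rfl]
  | case2 a =>
    intro es h
    simp [ev2] at h
    match es, h with
    | [e], _ => simp [assignStride2, ev2, inter]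
  | case3 a b t ih =>
    intro es h
    rw [ev2_cons] at h
    match es, h with
    | e :: es', h =>
      simp at h
      simp only [assignStride2]
      rw [ih es' (by simpa using h)]
      rw [show (a :: b :: t).tail = b :: t from rfl, ev2_cons]
      simp [inter]

lemma loopA (es os : List Char) (h1 : os.length ≤ es.length) (h2 : es.length ≤ os.length + 1) :
    (PySem.List.pyRange 0 (max (PySem.List.len es) (PySem.List.len os)) 1).foldl
      (fun acc i =>
        let acc2 := if i < PySem.List.len es then acc ++ [PySem.List.pyGetD es i ' '] else acc
        if i < PySem.List.len os then acc2 ++ [PySem.List.pyGetD os i ' '] else acc2)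
      [] = inter es os := by
  have hmax : max (PySem.List.len es) (PySem.List.len os) = ((max es.length os.length : Nat) : Int) := by
    simp [PySem.List.len_eq]
  rw [hmax, PySem.List.pyRange_zero_natCast, List.foldl_map]
  have hbody : (fun (acc : List Char) (k : Nat) =>
        (fun acc (i : Int) =>
          let acc2 := if i < PySem.List.len es then acc ++ [PySem.List.pyGetD es i ' '] else acc
          if i < PySem.List.len os then acc2 ++ [PySem.List.pyGetD os i ' '] else acc2) acc (k : Int))
      = (fun acc k => acc ++ ((if k < es.length then [es.getD k ' '] else []) ++
                (if k < os.length then [os.getD k ' '] else []))) := by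
    funext acc k
    simp only [PySem.List.len_eq, PySem.List.pyGetD_natCast, Nat.cast_lt]
    split_ifs <;> simp
  rw [hbody, PySem.List.foldl_append_eq_flatMap]
  simpa using flat_inter es os h1 h2

-- ===== VERDICT (by name: the statement is the Claim_ definition above) =====
theorem inverse_even_characters_spec : Claim_equal_inverse_even_characters := by
  intro s _
  unfold Spec_inverse_even_characters inverse_even_characters inverse_even_characters_alt
  simp only [slice?_two, Option.getD_some, PySem.List.slice?_none_none_neg_one]
  rw [slice?_odd, Option.getD_some]
  congr 1
  have hlen1 : (ev2 s.toList).reverse.length = (s.toList.length + 1) / 2 := by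
    simp [len_ev2]
  have hlen2 : (ev2 s.toList.tail).length = (s.toList.length - 1 + 1) / 2 := by
    rw [len_ev2]; cases s.toList <;> simp
  rw [loopA _ _ (by omega) (by omega)]
  rw [assign_inter s.toList _ (by simp [len_ev2])]
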